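-- pv_equiv track=rewrite | github.com/aquillesf/UFSC | INE5603 Orientação-a-objetos/Projeto Gomoku/Gomoku_Jogo.py | vitoria
-- ===== SOURCE A (Python) =====
-- def vitoria(sequencia, peça):
--     con = 0
--     for peca in sequencia:
--         #verifica se há peças em sequencia e realiza a contagem até o limite 5
--         if peca == peça:
--             con += 1
--             if con == 5:
--                 return True
--         else:
--             con = 0
--     return False
-- ===== SOURCE B (Python) =====
-- def _runs(sequencia):
--     # run-length encoding: maximal runs of consecutive equal elements
--     if not sequencia:
--         return []
--     out = []
--     key, cnt = sequencia[0], 1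
--     for x in sequencia[1:]:
--         if x == key:
--             cnt += 1
--         else:
--             out.append((key, cnt))
--             key, cnt = x, 1
--     out.append((key, cnt))
--     return out
--
-- def vitoria(sequencia, peça):
--     return any(k == peça and n >= 5 for k, n in _runs(sequencia))
-- ===== Notes on version B (the rewrite author's own statement) =====
-- stated objective: alternative
-- what changed: B replaces A's reset-on-mismatch counter with a run-length decomposition: it splits the sequence into maximal runs of equal elements and returns whether any run of the piece has length >= 5.
import Mathlib
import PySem

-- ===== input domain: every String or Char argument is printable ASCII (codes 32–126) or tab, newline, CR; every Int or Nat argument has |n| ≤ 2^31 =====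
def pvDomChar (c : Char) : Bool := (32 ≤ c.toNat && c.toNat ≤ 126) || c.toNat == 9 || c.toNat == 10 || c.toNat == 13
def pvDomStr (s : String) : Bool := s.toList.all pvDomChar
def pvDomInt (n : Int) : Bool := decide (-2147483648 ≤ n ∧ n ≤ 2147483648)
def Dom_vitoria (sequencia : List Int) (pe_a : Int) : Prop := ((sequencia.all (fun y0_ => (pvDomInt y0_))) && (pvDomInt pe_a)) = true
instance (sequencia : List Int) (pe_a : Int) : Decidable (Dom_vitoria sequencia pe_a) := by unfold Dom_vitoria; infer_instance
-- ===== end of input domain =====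

-- B replaces A's reset-on-mismatch counter with a run-length decomposition (maximal runs, then check); alternative, same cost.


-- ===== PORT A =====
-- A's for-loop with accumulator con, with early return True at con == 5
def vitoriaLoop (pe_a : Int) (con : Int) : List Int → Bool
  | [] => false
  | peca :: rest =>
    if peca = pe_a then
      if con + 1 = 5 then true else vitoriaLoop pe_a (con + 1) rest
    else vitoriaLoop pe_a 0 rest

def vitoria (sequencia : List Int) (pe_a : Int) : Bool :=
  vitoriaLoop pe_a 0 sequencia

-- ===== PORT B =====
-- _runs: run-length encoding; (key, cnt) is the current open run, emitted when broken (Source B's loop as recursion)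
def runsAux (key : Int) (cnt : Nat) : List Int → List (Int × Nat)
  | [] => [(key, cnt)]
  | x :: xs => if x = key then runsAux key (cnt + 1) xs else (key, cnt) :: runsAux x 1 xs

def runs : List Int → List (Int × Nat)
  | [] => []
  | x :: xs => runsAux x 1 xs

def vitoria_alt (sequencia : List Int) (pe_a : Int) : Bool :=
  (runs sequencia).any (fun kn => kn.1 == pe_a && decide (5 ≤ kn.2))

-- ===== PRECONDITION & SPEC =====
def Spec_vitoria (sequencia : List Int) (pe_a : Int) (out : Bool) : Prop := out = vitoria_alt sequencia pe_a
instance (sequencia : List Int) (pe_a : Int) (out : Bool) : Decidable (Spec_vitoria sequencia pe_a out) := by unfold Spec_vitoria; infer_instance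

-- ===== CLAIM (what is proved, stated in full; the proofs are below) =====
def Claim_equal_vitoria : Prop := ∀ (sequencia : List Int) (pe_a : Int), Dom_vitoria sequencia pe_a → Spec_vitoria sequencia pe_a (vitoria sequencia pe_a)

-- ===== LEMMAS AND PROOFS =====

-- if the open run already has ≥ 5 pieces of pe_a, B finds a winning run
theorem runsAux_big (pe_a : Int) (xs : List Int) (cnt : Nat) (h5 : 5 ≤ cnt) :
    (runsAux pe_a cnt xs).any (fun kn => kn.1 == pe_a && decide (5 ≤ kn.2)) = true := by
  induction xs generalizing cnt with
  | nil => simp [runsAux, h5]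
  | cons x xs ih =>
    by_cases hx : x = pe_a
    · simp only [runsAux, if_pos hx]
      exact ih (cnt + 1) (Nat.le_succ_of_le h5)
    · simp [runsAux, hx, h5]

-- main invariant: mid-run of `key` with `cnt` pieces seen, A's counter is cnt if key = pe_a (and then cnt < 5) else 0
theorem loop_eq_runsAux (pe_a : Int) (xs : List Int) (key : Int) (cnt : Nat)
    (hlt : key = pe_a → cnt < 5) :
    vitoriaLoop pe_a (if key = pe_a then (cnt : Int) else 0) xs
      = (runsAux key cnt xs).any (fun kn => kn.1 == pe_a && decide (5 ≤ kn.2)) := by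
  induction xs generalizing key cnt with
  | nil =>
    by_cases hk : key = pe_a
    · have := hlt hk
      simp [vitoriaLoop, runsAux, hk, Nat.not_le.mpr this]
    · simp [vitoriaLoop, runsAux, hk]
  | cons x xs ih =>
    by_cases hx : x = key
    · subst hx
      by_cases hk : x = pe_a
      · have hc : cnt < 5 := hlt hk
        by_cases h5 : (cnt : Int) + 1 = 5
        · have hbig := runsAux_big pe_a xs (cnt + 1) (by omega)
          simp [vitoriaLoop, runsAux, hk, h5, hbig]
        · have := ih x (cnt + 1) (fun _ => by omega)
          simp [hk] at this
          simp [vitoriaLoop, runsAux, hk, h5, this]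
      · have := ih x (cnt + 1) (fun h => absurd h hk)
        simp [hk] at this
        simp [vitoriaLoop, runsAux, hk, this]
    · by_cases hxp : x = pe_a
      · have hkp : ¬ key = pe_a := fun h => hx (hxp.trans h.symm)
        have := ih x 1 (fun _ => by omega)
        simp [hxp] at this
        have hpk : ¬ pe_a = key := fun h => hkp h.symm
        simp [vitoriaLoop, runsAux, hxp, hkp, hpk, this]
      · have := ih x 1 (fun h => absurd h hxp)
        simp [hxp] at this
        by_cases hk : key = pe_a
        · have hc : cnt < 5 := hlt hk
          simp [vitoriaLoop, runsAux, hxp, hk, this, Nat.not_le.mpr hc]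
        · simp [vitoriaLoop, runsAux, hx, hxp, hk, this]

-- ===== VERDICT (by name: the statement is the Claim_ definition above) =====
theorem vitoria_spec : Claim_equal_vitoria := by
  intro sequencia pe_a _
  unfold Spec_vitoria vitoria vitoria_alt
  cases sequencia with
  | nil => simp [vitoriaLoop, runs]
  | cons x xs =>
    have h := loop_eq_runsAux pe_a xs x 1 (fun _ => by omega)
    by_cases hxp : x = pe_a
    · simp [hxp] at h
      simp [runs, vitoriaLoop, hxp, h]
    · simp [hxp] at h
      simp [runs, vitoriaLoop, hxp, h]
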